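-- pv_equiv track=rewrite | github.com/praneeth172004/hushh-research | consent-protocol/api/routes/kai/market_insights.py | _normalize_symbols
-- ===== SOURCE A (Python) =====
-- DEFAULT_SYMBOLS = ["AAPL", "MSFT", "NVDA", "AMZN", "GOOGL"]
--
-- WATCHLIST_MAX = 8
--
-- def _normalize_symbols(raw: str | None) -> list[str]:
--     if not raw:
--         return DEFAULT_SYMBOLS
--     parts = [part.strip().upper() for part in raw.split(",")]
--     out: list[str] = []
--     for part in parts:
--         if not part:
--             continue
--         if len(part) > 10:
--             continue
--         if part not in out:
--             out.append(part)
--         if len(out) >= WATCHLIST_MAX: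
--             break
--     return out or DEFAULT_SYMBOLS
-- ===== SOURCE B (Python) =====
-- DEFAULT_SYMBOLS = ["AAPL", "MSFT", "NVDA", "AMZN", "GOOGL"]
--
-- WATCHLIST_MAX = 8
--
-- def _normalize_symbols(raw):
--     if not raw:
--         return DEFAULT_SYMBOLS
--     tokens = [p.strip().upper() for p in raw.split(",")]
--
--     def pick(tokens, k):
--         # Take the first valid token, delete its future occurrences from the
--         # tail, and recurse with one fewer slot; no seen-list is maintained.
--         if k == 0:
--             return []
--         for i, t in enumerate(tokens):
--             if t and len(t) <= 10:
--                 return [t] + pick([x for x in tokens[i + 1:] if x != t], k - 1)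
--         return []
--
--     return pick(tokens, WATCHLIST_MAX) or DEFAULT_SYMBOLS
-- ===== Notes on version B (the rewrite author's own statement) =====
-- stated objective: alternative
-- what changed: A's single iterative loop with a seen-accumulator ('part not in out' scan) and an early break is replaced by a recursive selection: take the first valid token, delete all its future occurrences from the tail, and recurse with a countdown of remaining slots; no seen-list exists and the output is built front-to-back by recursion.
import Mathlib
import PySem

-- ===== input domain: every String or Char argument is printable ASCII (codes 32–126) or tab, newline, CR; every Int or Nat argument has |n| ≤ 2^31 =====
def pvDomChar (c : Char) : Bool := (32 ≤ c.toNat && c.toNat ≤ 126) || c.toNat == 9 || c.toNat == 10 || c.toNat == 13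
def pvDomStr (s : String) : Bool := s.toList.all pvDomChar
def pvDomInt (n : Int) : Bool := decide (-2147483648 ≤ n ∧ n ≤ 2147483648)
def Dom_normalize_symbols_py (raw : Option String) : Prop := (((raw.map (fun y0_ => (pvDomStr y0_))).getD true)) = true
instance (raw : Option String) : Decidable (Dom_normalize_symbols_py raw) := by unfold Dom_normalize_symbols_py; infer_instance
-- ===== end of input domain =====

-- B replaces A's iterative loop with a seen-accumulator and early break by a recursive
-- selection that deletes each accepted token's future occurrences from the tail and
-- counts down the remaining slots — objective: alternative (no speed claim).

def pvDefaultSymbols : List String := ["AAPL", "MSFT", "NVDA", "AMZN", "GOOGL"]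

-- ===== PORT A =====
def pvLoopA : List String → List String → List String
  | [], out => out
  | p :: ps, out =>
    if p = "" then pvLoopA ps out
    else if 10 < PySem.Str.len p then pvLoopA ps out
    else
      let out' := if p ∈ out then out else out ++ [p]
      if 8 ≤ out'.length then out' else pvLoopA ps out'

def normalize_symbols_py (raw : Option String) : List String :=
  match raw with
  | none => pvDefaultSymbols
  | some s =>
    if s = "" then pvDefaultSymbols
    else
      -- parts = [part.strip().upper() for part in raw.split(",")]; out = the loop's result
      if pvLoopA (((PySem.Str.split? s ",").getD []).map
            (fun part => PySem.Str.upper (PySem.Str.strip part))) [] = []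
      then pvDefaultSymbols
      else pvLoopA (((PySem.Str.split? s ",").getD []).map
            (fun part => PySem.Str.upper (PySem.Str.strip part))) []

-- ===== PORT B =====
-- pick(tokens, k): first valid token, then recurse on the tail with its occurrences removed
def pvPick : List String → Nat → List String
  | _, 0 => []
  | [], _ + 1 => []
  | t :: rest, k + 1 =>
    if t ≠ "" ∧ PySem.Str.len t ≤ 10 then
      t :: pvPick (rest.filter (fun x => x != t)) k
    else
      pvPick rest (k + 1)
termination_by l _ => l.length
decreasing_by
  · have := List.length_filter_le (fun x => x != t) rest
    simp; omega
  · simp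

def normalize_symbols_py_alt (raw : Option String) : List String :=
  match raw with
  | none => pvDefaultSymbols
  | some s =>
    if s = "" then pvDefaultSymbols
    else
      -- tokens = cleaned split; pick(tokens, WATCHLIST_MAX) or DEFAULT_SYMBOLS
      if pvPick (((PySem.Str.split? s ",").getD []).map
            (fun part => PySem.Str.upper (PySem.Str.strip part))) 8 = []
      then pvDefaultSymbols
      else pvPick (((PySem.Str.split? s ",").getD []).map
            (fun part => PySem.Str.upper (PySem.Str.strip part))) 8

-- ===== PRECONDITION & SPEC =====
def Spec_normalize_symbols_py (raw : Option String) (out : List String) : Prop := out = normalize_symbols_py_alt raw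
instance (raw : Option String) (out : List String) : Decidable (Spec_normalize_symbols_py raw out) := by unfold Spec_normalize_symbols_py; infer_instance

-- ===== CLAIM (what is proved, stated in full; the proofs are below) =====
def Claim_equal_normalize_symbols_py : Prop := ∀ (raw : Option String), Dom_normalize_symbols_py raw → Spec_normalize_symbols_py raw (normalize_symbols_py raw)

-- ===== LEMMAS AND PROOFS =====

-- A's fused loop = out ++ pick of the tokens not already in out, with 8 - |out| slots left
lemma pvLoopA_eq_pick (ps : List String) : ∀ (out : List String), out.length < 8 →
    pvLoopA ps out =
      out ++ pvPick (ps.filter (fun p => !(decide (p ∈ out)))) (8 - out.length) := by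
  induction ps with
  | nil =>
    intro out h
    have : ∃ m, 8 - out.length = m + 1 := ⟨7 - out.length, by omega⟩
    obtain ⟨m, hm⟩ := this
    simp [pvLoopA, hm, pvPick]
  | cons p ps ih =>
    intro out h
    obtain ⟨m, hm⟩ : ∃ m, 8 - out.length = m + 1 := ⟨7 - out.length, by omega⟩
    by_cases hmem : p ∈ out
    · -- p is filtered away on the right; on the left it is a no-op step
      have hf : (p :: ps).filter (fun p => !(decide (p ∈ out)))
          = ps.filter (fun p => !(decide (p ∈ out))) := by simp [hmem]
      rw [hf]
      by_cases hp : p = ""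
      · rw [pvLoopA, if_pos hp]; exact ih out h
      · by_cases hl : 10 < PySem.Str.len p
        · rw [pvLoopA, if_neg hp, if_pos hl]; exact ih out h
        · have h8 : ¬ 8 ≤ (if p ∈ out then out else out ++ [p]).length := by
            simp [hmem]; omega
          rw [pvLoopA, if_neg hp, if_neg hl]
          simp only [hmem, if_true]
          rw [if_neg (by omega : ¬ 8 ≤ out.length)]
          exact ih out h
    · have hf : (p :: ps).filter (fun p => !(decide (p ∈ out)))
          = p :: ps.filter (fun p => !(decide (p ∈ out))) := by simp [hmem]
      rw [hf, hm]
      by_cases hp : p = ""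
      · have : ¬ (p ≠ "" ∧ PySem.Str.len p ≤ 10) := by simp [hp]
        rw [pvLoopA, if_pos hp, pvPick, if_neg this, ← hm]
        exact ih out h
      · by_cases hl : 10 < PySem.Str.len p
        · have : ¬ (p ≠ "" ∧ PySem.Str.len p ≤ 10) := by
            intro ⟨_, h2⟩; omega
          rw [pvLoopA, if_neg hp, if_pos hl, pvPick, if_neg this, ← hm]
          exact ih out h
        · -- accepted token
          have hcond : p ≠ "" ∧ PySem.Str.len p ≤ 10 := ⟨hp, by omega⟩
          rw [pvLoopA, if_neg hp, if_neg hl, pvPick, if_pos hcond]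
          simp only [hmem, if_neg, not_false_iff]
          have hcomb : (ps.filter (fun q => !(decide (q ∈ out)))).filter (fun x => x != p)
              = ps.filter (fun q => !(decide (q ∈ out ++ [p]))) := by
            rw [List.filter_filter]
            apply List.filter_congr
            intro x _
            by_cases hx : x = p <;> by_cases hxo : x ∈ out <;> simp [hx, hxo]
          by_cases h8 : 8 ≤ (out ++ [p]).length
          · have hlen : out.length = 7 := by simp at h8; omega
            have hm0 : m = 0 := by omega
            rw [if_pos h8, hm0, hcomb]
            simp [pvPick]
          · have hlt : (out ++ [p]).length < 8 := by omega
            rw [if_neg h8, ih (out ++ [p]) hlt, hcomb]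
            have : 8 - (out ++ [p]).length = m := by simp; omega
            rw [this]
            simp

-- ===== VERDICT (by name: the statement is the Claim_ definition above) =====
theorem normalize_symbols_py_spec : Claim_equal_normalize_symbols_py := by
  intro raw _
  unfold Spec_normalize_symbols_py normalize_symbols_py normalize_symbols_py_alt
  cases raw with
  | none => rfl
  | some s =>
    by_cases hs : s = ""
    · simp [hs]
    · simp only [if_neg hs]
      have := pvLoopA_eq_pick (((PySem.Str.split? s ",").getD []).map
            (fun part => PySem.Str.upper (PySem.Str.strip part))) [] (by simp)
      simp only [List.not_mem_nil, decide_false, Bool.not_false, List.filter_true,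
        List.nil_append, List.length_nil, Nat.sub_zero] at this
      rw [this]
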